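-- pv_equiv track=rewrite | github.com/ijhoskins/satmut_utils | src/analysis/coordinate_mapper.py | _group_mismatches
-- ===== SOURCE A (Python) =====
-- def _group_mismatches(mm_positions, mm_indices):
--     """Groups mismatches to enable determination of substitution or delins type.
--
--     :param tuple mm_positions: mismatched positions
--     :param tuple mm_indices: mismatched indices of REF and ALT fields
--     :return tuple: group tuple containing lists of indices and positions
--     """
--
--     mm_groups = [[]]
--     for i, (mm_idx, mm_pos) in enumerate(zip(mm_indices, mm_positions)):
--         if i == 0:
--             mm_groups[0].append((mm_idx, mm_pos,))
--             continue
--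
--         for j, mm_group in enumerate(mm_groups):
--             """As of 9/14/2023 HGVS recommends the following annotation changes, pending a decision
--             # https://varnomen.hgvs.org/bg-material/consultation/svd-wg010/
--             pairs of variants should be considered in order of increasing sequencing position.
--             If variants A, B, and C occur in that order on a sequence, and A and B might be merged, and B and C
--             might be merged, A, B and C should be merged and described as a single “delins” variant"""
--             mm_group_max_pos = max([mm_group[e][1] for e in range(len(mm_group))])
--             if (mm_pos - mm_group_max_pos) < 3:
--                 mm_groups[j].append((mm_idx, mm_pos,))
--                 break
--         else:
--             # If the mismatch could not be merged with an existing group create a new one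
--             mm_groups.append([(mm_idx, mm_pos,)])
--
--     return tuple(mm_groups)
-- ===== SOURCE B (Python) =====
-- def _group_mismatches(mm_positions, mm_indices):
--     """Two-phase regrouping: pass 1 assigns each mismatch a group label using a
--     flat running list of group maxima; pass 2 builds each group by label."""
--     pairs = list(zip(mm_indices, mm_positions))
--     labels = []
--     maxes = []
--     for _, pos in pairs:
--         for j, mx in enumerate(maxes):
--             if pos - mx < 3:
--                 labels.append(j)
--                 if pos > mx:
--                     maxes[j] = pos
--                 break
--         else:
--             labels.append(len(maxes))
--             maxes.append(pos)
--     return tuple([p for p, lab in zip(pairs, labels) if lab == g]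
--                  for g in range(len(maxes)))
-- ===== Notes on version B (the rewrite author's own statement) =====
-- stated objective: faster
-- what changed: B is a staged two-pass algorithm: pass 1 assigns each mismatch a group label using only a flat list of per-group running maxima (no group lists are touched), pass 2 materialises the groups by filtering the pairs per label; A instead builds the nested group lists incrementally and recomputes max over a whole group's members for every candidate merge.
-- intended difference: When zip(mm_indices, mm_positions) is empty (either list empty) A returns ([],), a tuple holding one empty group left over from its [[]] initialization, while B returns (), the intended 'no mismatches, no groups' value. — e.g. on _group_mismatches([], []): A returns [[]], B returns []
import Mathlib
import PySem

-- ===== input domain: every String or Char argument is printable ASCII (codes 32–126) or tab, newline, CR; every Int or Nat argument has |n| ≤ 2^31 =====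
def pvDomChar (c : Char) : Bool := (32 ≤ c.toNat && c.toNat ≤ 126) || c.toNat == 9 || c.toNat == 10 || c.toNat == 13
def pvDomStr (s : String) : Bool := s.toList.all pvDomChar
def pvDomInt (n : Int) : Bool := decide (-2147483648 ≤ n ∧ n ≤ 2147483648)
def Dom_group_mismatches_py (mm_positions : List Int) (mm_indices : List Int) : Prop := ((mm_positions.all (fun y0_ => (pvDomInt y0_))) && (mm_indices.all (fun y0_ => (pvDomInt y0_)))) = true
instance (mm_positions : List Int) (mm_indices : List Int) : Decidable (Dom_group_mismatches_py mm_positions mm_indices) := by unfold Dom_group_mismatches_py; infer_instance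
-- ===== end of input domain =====

-- B is a staged two-pass algorithm (label assignment over a flat list of group maxima, then group-by-label), replacing A's incremental nested-list construction with per-merge max recomputation.

-- ===== PORT A =====
-- max([mm_group[e][1] for e in range(len(mm_group))]) : Python max of the positions of a (nonempty) group
def pyMaxPos (g : List (Int × Int)) : Int :=
  match g with
  | [] => 0          -- unreachable: Python max([]) raises, but every group is nonempty when scanned
  | x :: xs => xs.foldl (fun m q => max m q.2) x.2

-- the inner 'for j, mm_group in enumerate(mm_groups): … break / else' loop:
-- some = appended into the first group whose max is within 2; none = the else branch runs
def tryInsertA (mm_idx mm_pos : Int) : List (List (Int × Int)) → Option (List (List (Int × Int)))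
  | [] => none
  | g :: rest =>
    if mm_pos - pyMaxPos g < 3 then some ((g ++ [(mm_idx, mm_pos)]) :: rest)
    else (tryInsertA mm_idx mm_pos rest).map (fun gs => g :: gs)

def group_mismatches_py (mm_positions : List Int) (mm_indices : List Int) : List (List (Int × Int)) :=
  ((mm_indices.zip mm_positions).foldl
    (fun (st : List (List (Int × Int)) × Nat) p =>
      let groups := st.1
      let i := st.2
      let groups' :=
        if i = 0 then
          match groups with
          | g :: rest => (g ++ [p]) :: rest    -- mm_groups[0].append(...)
          | [] => groups                        -- unreachable
        else
          match tryInsertA p.1 p.2 groups with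
          | some gs => gs
          | none => groups ++ [[p]]
      (groups', i + 1))
    ([[]], 0)).1

-- ===== PORT B =====
-- pass-1 inner 'for j, mx in enumerate(maxes): … break / else': first j with pos - mx < 3,
-- returning (j, updated maxes); none = no group matches
def firstFit (pos : Int) : List Int → Option (Nat × List Int)
  | [] => none
  | mx :: rest =>
    if pos - mx < 3 then some (0, (if pos > mx then pos else mx) :: rest)
    else (firstFit pos rest).map (fun jm => (jm.1 + 1, mx :: jm.2))

-- one step of pass 1: state = (labels, maxes)
def phase1F (st : List Nat × List Int) (p : Int × Int) : List Nat × List Int :=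
  match firstFit p.2 st.2 with
  | some jm => (st.1 ++ [jm.1], jm.2)
  | none => (st.1 ++ [st.2.length], st.2 ++ [p.2])

-- pass 2: '[p for p, lab in zip(pairs, labels) if lab == g]'
def collectB (pairs : List (Int × Int)) (labels : List Nat) (g : Nat) : List (Int × Int) :=
  ((pairs.zip labels).filter (fun q => q.2 == g)).map Prod.fst

def group_mismatches_py_alt (mm_positions : List Int) (mm_indices : List Int) : List (List (Int × Int)) :=
  let pairs := mm_indices.zip mm_positions
  let st := pairs.foldl phase1F ([], [])
  (List.range st.2.length).map (collectB pairs st.1)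

-- ===== PRECONDITION & SPEC =====
-- When either list is empty the zip is empty: A returns [[]] (one leftover empty group from its [[]] seed), B returns [] — the intended 'no mismatches, no groups' value.
def D_group_mismatches_py (mm_positions : List Int) (mm_indices : List Int) : Prop :=
  mm_positions = [] ∨ mm_indices = []
instance (mm_positions : List Int) (mm_indices : List Int) : Decidable (D_group_mismatches_py mm_positions mm_indices) := by unfold D_group_mismatches_py; infer_instance

def Spec_group_mismatches_py (mm_positions : List Int) (mm_indices : List Int) (out : List (List (Int × Int))) : Prop := ¬ D_group_mismatches_py mm_positions mm_indices → out = group_mismatches_py_alt mm_positions mm_indices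
instance (mm_positions : List Int) (mm_indices : List Int) (out : List (List (Int × Int))) : Decidable (Spec_group_mismatches_py mm_positions mm_indices out) := by unfold Spec_group_mismatches_py; infer_instance

def pvDiffWitness_group_mismatches_py : List Int × List Int := ([], [])
def pvDiffWitnessOut_group_mismatches_py : (List (List (Int × Int))) × (List (List (Int × Int))) := ([[]], [])

-- ===== CLAIM (what is proved, stated in full; the proofs are below) =====
def Claim_unchanged_group_mismatches_py : Prop := ∀ (mm_positions : List Int) (mm_indices : List Int), Dom_group_mismatches_py mm_positions mm_indices → Spec_group_mismatches_py mm_positions mm_indices (group_mismatches_py mm_positions mm_indices)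
def Claim_changed_group_mismatches_py : Prop := Dom_group_mismatches_py (pvDiffWitness_group_mismatches_py.1) (pvDiffWitness_group_mismatches_py.2) ∧ D_group_mismatches_py (pvDiffWitness_group_mismatches_py.1) (pvDiffWitness_group_mismatches_py.2) ∧ group_mismatches_py (pvDiffWitness_group_mismatches_py.1) (pvDiffWitness_group_mismatches_py.2) = pvDiffWitnessOut_group_mismatches_py.1 ∧ group_mismatches_py_alt (pvDiffWitness_group_mismatches_py.1) (pvDiffWitness_group_mismatches_py.2) = pvDiffWitnessOut_group_mismatches_py.2 ∧ pvDiffWitnessOut_group_mismatches_py.1 ≠ pvDiffWitnessOut_group_mismatches_py.2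
def Claim_exact_group_mismatches_py : Prop := ∀ (mm_positions : List Int) (mm_indices : List Int), Dom_group_mismatches_py mm_positions mm_indices → D_group_mismatches_py mm_positions mm_indices → group_mismatches_py mm_positions mm_indices ≠ group_mismatches_py_alt mm_positions mm_indices

-- ===== LEMMAS AND PROOFS =====

-- proof-only intermediate: A's loop with each group tagged with its (cached) max position
def tryInsertB (mm_idx mm_pos : Int) : List (List (Int × Int) × Int) → Option (List (List (Int × Int) × Int))
  | [] => none
  | (g, mx) :: rest =>
    if mm_pos - mx < 3 then
      some ((g ++ [(mm_idx, mm_pos)], if mm_pos > mx then mm_pos else mx) :: rest)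
    else (tryInsertB mm_idx mm_pos rest).map (fun gs => (g, mx) :: gs)

def midF (st : List (List (Int × Int) × Int)) (p : Int × Int) : List (List (Int × Int) × Int) :=
  match st with
  | [] => [([p], p.2)]
  | _ =>
    match tryInsertB p.1 p.2 st with
    | some st' => st'
    | none => st ++ [([p], p.2)]

def tagMax (g : List (Int × Int)) : List (Int × Int) × Int := (g, pyMaxPos g)

-- mid-state expressed through B's (labels, maxes) data
def stOf (pairs : List (Int × Int)) (labels : List Nat) (maxes : List Int) :
    List (List (Int × Int) × Int) :=
  ((List.range maxes.length).map (collectB pairs labels)).zip maxes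

lemma pyMaxPos_append (g : List (Int × Int)) (hg : g ≠ []) (p : Int × Int) :
    pyMaxPos (g ++ [p]) = max (pyMaxPos g) p.2 := by
  match g with
  | [] => exact absurd rfl hg
  | x :: xs => simp [pyMaxPos, List.foldl_append]

lemma tryInsert_agree (mm_idx mm_pos : Int) (groups : List (List (Int × Int)))
    (hne : ∀ g ∈ groups, g ≠ []) :
    tryInsertB mm_idx mm_pos (groups.map tagMax)
      = (tryInsertA mm_idx mm_pos groups).map (List.map tagMax) := by
  induction groups with
  | nil => simp [tryInsertA, tryInsertB]
  | cons g rest ih =>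
    have hg : g ≠ [] := hne g (by simp)
    simp only [List.map_cons, tryInsertA, tryInsertB, tagMax]
    by_cases h : mm_pos - pyMaxPos g < 3
    · simp only [h, if_pos]
      have : pyMaxPos (g ++ [(mm_idx, mm_pos)])
          = if mm_pos > pyMaxPos g then mm_pos else pyMaxPos g := by
        rw [pyMaxPos_append g hg]
        rcases lt_or_ge (pyMaxPos g) mm_pos with h' | h' <;> simp [max_def] <;> omega
      simp [Option.map, tagMax, this]
    · simp only [h, if_neg, not_false_iff]
      rw [ih (fun x hx => hne x (by simp [hx]))]
      cases tryInsertA mm_idx mm_pos rest <;> simp [tagMax]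

lemma tryInsertA_nonempty (mm_idx mm_pos : Int) (groups gs : List (List (Int × Int)))
    (hne : ∀ g ∈ groups, g ≠ []) (h : tryInsertA mm_idx mm_pos groups = some gs) :
    ∀ g ∈ gs, g ≠ [] := by
  induction groups generalizing gs with
  | nil => simp [tryInsertA] at h
  | cons g rest ih =>
    simp only [tryInsertA] at h
    by_cases hc : mm_pos - pyMaxPos g < 3
    · rw [if_pos hc] at h
      cases h
      intro x hx
      simp only [List.mem_cons] at hx
      rcases hx with rfl | hx
      · simp
      · exact hne x (List.mem_cons_of_mem _ hx)
    · rw [if_neg hc, Option.map_eq_some_iff] at h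
      obtain ⟨gs', h1, rfl⟩ := h
      intro x hx
      simp only [List.mem_cons] at hx
      rcases hx with rfl | hx
      · exact hne _ (by simp)
      · exact ih gs' (fun y hy => hne y (List.mem_cons_of_mem _ hy)) h1 x hx

-- one step of A's tail loop (i ≥ 1) matched with one step of the mid loop
lemma fold_agree (ps : List (Int × Int)) (groups : List (List (Int × Int))) (i : Nat)
    (hne : ∀ g ∈ groups, g ≠ []) (hi : i ≠ 0) :
    (ps.foldl
      (fun (st : List (List (Int × Int)) × Nat) p =>
        let gs := st.1
        let k := st.2
        let gs' :=
          if k = 0 then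
            match gs with
            | g :: rest => (g ++ [p]) :: rest
            | [] => gs
          else
            match tryInsertA p.1 p.2 gs with
            | some out => out
            | none => gs ++ [[p]]
        (gs', k + 1))
      (groups, i)).1
    = (ps.foldl midF (groups.map tagMax)).map Prod.fst := by
  induction ps generalizing groups i with
  | nil => simp [tagMax, List.map_map, Function.comp_def]
  | cons p ps ih =>
    simp only [List.foldl_cons]
    cases hgs : groups with
    | nil =>
      subst hgs
      have hrec := ih [[p]] (i + 1) (by intro g hg; simp at hg; subst hg; simp) (by omega)
      simp only [List.map_nil, if_neg hi]
      simpa [tryInsertA, midF, tagMax, pyMaxPos] using hrec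
    | cons g0 rest0 =>
      subst hgs
      cases hA' : tryInsertA p.1 p.2 (g0 :: rest0) with
      | some out =>
        have hB : tryInsertB p.1 p.2 ((g0 :: rest0).map tagMax) = some (out.map tagMax) := by
          rw [tryInsert_agree p.1 p.2 _ hne, hA']; rfl
        have hout := tryInsertA_nonempty p.1 p.2 _ out hne hA'
        have hrec := ih out (i + 1) hout (by omega)
        rw [List.map_cons] at hB
        simp only [List.map_cons, if_neg hi, midF, hB]
        exact hrec
      | none =>
        have hB : tryInsertB p.1 p.2 ((g0 :: rest0).map tagMax) = none := by
          rw [tryInsert_agree p.1 p.2 _ hne, hA']; rfl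
        have hnew : ∀ g ∈ (g0 :: rest0) ++ [[p]], g ≠ [] := by
          intro g hg
          rcases List.mem_append.mp hg with hg | hg
          · exact hne g hg
          · simp at hg; subst hg; simp
        have hrec := ih ((g0 :: rest0) ++ [[p]]) (i + 1) hnew (by omega)
        rw [List.map_cons] at hB
        simp only [List.map_cons, if_neg hi, midF, hB]
        simpa [tagMax, pyMaxPos] using hrec

lemma A_eq_mid (mm_positions mm_indices : List Int)
    (h : ¬ D_group_mismatches_py mm_positions mm_indices) :
    group_mismatches_py mm_positions mm_indices
      = ((mm_indices.zip mm_positions).foldl midF []).map Prod.fst := by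
  unfold D_group_mismatches_py at h
  rw [not_or] at h
  obtain ⟨hp, hi⟩ := h
  cases mm_indices with
  | nil => exact absurd rfl hi
  | cons a as =>
    cases mm_positions with
    | nil => exact absurd rfl hp
    | cons b bs =>
      unfold group_mismatches_py
      simp only [List.zip_cons_cons, List.foldl_cons]
      have h0 : ∀ g ∈ ([[(a, b)]] : List (List (Int × Int))), g ≠ [] := by
        intro g hg; simp at hg; subst hg; simp
      have hrec := fold_agree (as.zip bs) [[(a, b)]] 1 h0 (by omega)
      simpa [midF, tagMax, pyMaxPos] using hrec

-- ===== mid = B =====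

lemma firstFit_some (pos : Int) (maxes : List Int) (jm : Nat × List Int)
    (h : firstFit pos maxes = some jm) : jm.1 < maxes.length ∧ jm.2.length = maxes.length := by
  induction maxes generalizing jm with
  | nil => simp [firstFit] at h
  | cons mx rest ih =>
    simp only [firstFit] at h
    by_cases hc : pos - mx < 3
    · rw [if_pos hc] at h
      cases h
      simp
    · rw [if_neg hc, Option.map_eq_some_iff] at h
      obtain ⟨jm', h1, rfl⟩ := h
      have := ih jm' h1
      simp only [List.length_cons]
      omega

lemma tib_ff (p : Int × Int) (gs : List (List (Int × Int))) (maxes : List Int)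
    (hlen : gs.length = maxes.length) :
    tryInsertB p.1 p.2 (gs.zip maxes)
      = (firstFit p.2 maxes).map (fun jm => (gs.modify jm.1 (· ++ [p])).zip jm.2) := by
  induction maxes generalizing gs with
  | nil =>
    have : gs = [] := List.length_eq_zero_iff.mp (by simpa using hlen)
    subst this; simp [tryInsertB, firstFit]
  | cons mx rest ih =>
    cases gs with
    | nil => simp at hlen
    | cons g gs' =>
      simp only [List.zip_cons_cons, tryInsertB, firstFit]
      by_cases hc : p.2 - mx < 3
      · simp [hc, List.modify]
      · rw [if_neg hc, if_neg hc,
          ih gs' (by simpa using hlen)]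
        cases h : firstFit p.2 rest with
        | none => simp
        | some jm => simp [List.modify]

lemma collect_append (pairs : List (Int × Int)) (labels : List Nat)
    (hlen : pairs.length = labels.length) (p : Int × Int) (j g : Nat) :
    collectB (pairs ++ [p]) (labels ++ [j]) g
      = collectB pairs labels g ++ (if j = g then [p] else []) := by
  unfold collectB
  rw [List.zip_append hlen, List.filter_append, List.map_append]
  by_cases h : j = g <;> simp [h]

lemma collect_top (pairs : List (Int × Int)) (labels : List Nat) (n : Nat)
    (hlab : ∀ l ∈ labels, l < n) : collectB pairs labels n = [] := by
  unfold collectB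
  rw [List.filter_eq_nil_iff.mpr, List.map_nil]
  intro q hq
  have : q.2 ∈ labels := List.of_mem_zip hq |>.2
  have := hlab _ this
  simp
  omega

lemma midF_ne (st : List (List (Int × Int) × Int)) (p : Int × Int) (h : st ≠ []) :
    midF st p = match tryInsertB p.1 p.2 st with
                | some st' => st'
                | none => st ++ [([p], p.2)] := by
  cases st with
  | nil => exact absurd rfl h
  | cons x xs => rfl

lemma mid_phase (ps : List (Int × Int)) :
    ∀ (pre : List (Int × Int)) (labels : List Nat) (maxes : List Int),
      pre.length = labels.length → (∀ l ∈ labels, l < maxes.length) → maxes ≠ [] →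
      ps.foldl midF (stOf pre labels maxes)
        = stOf (pre ++ ps) (ps.foldl phase1F (labels, maxes)).1
            (ps.foldl phase1F (labels, maxes)).2 := by
  induction ps with
  | nil => intro pre labels maxes _ _ _; simp
  | cons p ps ih =>
    intro pre labels maxes hlen hlab hmx
    have hn : 0 < maxes.length := List.length_pos_iff.mpr hmx
    have hglen : ((List.range maxes.length).map (collectB pre labels)).length = maxes.length := by
      simp
    have hstlen : (stOf pre labels maxes).length = maxes.length := by
      unfold stOf; simp
    have hst_ne : stOf pre labels maxes ≠ [] := by
      intro hcontra
      rw [hcontra] at hstlen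
      simp at hstlen
      omega
    have htib := tib_ff p ((List.range maxes.length).map (collectB pre labels)) maxes hglen
    simp only [List.foldl_cons]
    have hre : pre ++ p :: ps = (pre ++ [p]) ++ ps := by simp
    cases hff : firstFit p.2 maxes with
    | some jm =>
      obtain ⟨hjlt, hjlen⟩ := firstFit_some p.2 maxes jm hff
      have hmid : midF (stOf pre labels maxes) p
          = (((List.range maxes.length).map (collectB pre labels)).modify jm.1 (· ++ [p])).zip jm.2 := by
        rw [midF_ne _ _ hst_ne]
        unfold stOf
        rw [htib, hff]
        rfl
      have hmod : ((List.range maxes.length).map (collectB pre labels)).modify jm.1 (· ++ [p])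
          = (List.range jm.2.length).map (collectB (pre ++ [p]) (labels ++ [jm.1])) := by
        apply List.ext_getElem
        · simp [hjlen]
        · intro g h1 h2
          rw [List.getElem_modify]
          simp only [List.getElem_map, List.getElem_range]
          rw [collect_append pre labels hlen p jm.1 g]
          by_cases hg : jm.1 = g <;> simp [hg]
      have hstep : phase1F (labels, maxes) p = (labels ++ [jm.1], jm.2) := by
        unfold phase1F; rw [hff]
      rw [hmid, hmod, hstep, hre]
      exact ih (pre ++ [p]) (labels ++ [jm.1]) jm.2
        (by simp [hlen])
        (by intro l hl
            rcases List.mem_append.mp hl with h | h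
            · have := hlab l h; omega
            · simp at h; omega)
        (by intro hcon; rw [hcon] at hjlen; simp at hjlen; omega)
    | none =>
      have hmid : midF (stOf pre labels maxes) p
          = stOf pre labels maxes ++ [([p], p.2)] := by
        rw [midF_ne _ _ hst_ne]
        unfold stOf
        rw [htib, hff]
        rfl
      have hstep : phase1F (labels, maxes) p = (labels ++ [maxes.length], maxes ++ [p.2]) := by
        unfold phase1F; rw [hff]
      have hnewst : stOf pre labels maxes ++ [([p], p.2)]
          = stOf (pre ++ [p]) (labels ++ [maxes.length]) (maxes ++ [p.2]) := by
        unfold stOf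
        have hr : List.range (maxes ++ [p.2]).length = List.range maxes.length ++ [maxes.length] := by
          simp [List.range_succ]
        rw [hr, List.map_append,
          List.zip_append (by simp)]
        congr 1
        · congr 1
          apply List.map_congr_left
          intro g hg
          have hglt : g < maxes.length := List.mem_range.mp hg
          rw [collect_append pre labels hlen p maxes.length g]
          have : ¬ (maxes.length = g) := by omega
          simp [this]
        · simp only [List.map_cons, List.map_nil]
          rw [collect_append pre labels hlen p maxes.length maxes.length]
          rw [collect_top pre labels maxes.length hlab]
          simp
      rw [hmid, hstep, hnewst, hre]
      exact ih (pre ++ [p]) (labels ++ [maxes.length]) (maxes ++ [p.2])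
        (by simp [hlen])
        (by intro l hl
            rcases List.mem_append.mp hl with h | h
            · have := hlab l h; simp; omega
            · simp at h; simp; omega)
        (by simp)

lemma mid_eq_B (mm_positions mm_indices : List Int)
    (h : ¬ D_group_mismatches_py mm_positions mm_indices) :
    ((mm_indices.zip mm_positions).foldl midF []).map Prod.fst
      = group_mismatches_py_alt mm_positions mm_indices := by
  unfold D_group_mismatches_py at h
  rw [not_or] at h
  obtain ⟨hp, hi⟩ := h
  cases mm_indices with
  | nil => exact absurd rfl hi
  | cons a as =>
    cases mm_positions with
    | nil => exact absurd rfl hp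
    | cons b bs =>
      unfold group_mismatches_py_alt
      simp only [List.zip_cons_cons, List.foldl_cons]
      have h1 : midF [] (a, b) = stOf [(a, b)] [0] [b] := by
        simp [midF, stOf, collectB]
      have h2 : phase1F ([], []) (a, b) = ([0], [b]) := by
        simp [phase1F, firstFit]
      rw [h1, h2]
      rw [mid_phase (as.zip bs) [(a, b)] [0] [b] (by simp) (by simp) (by simp)]
      unfold stOf
      rw [List.map_fst_zip (by simp)]
      simp

-- ===== VERDICT (by name: the statement is the Claim_ definition above) =====
theorem group_mismatches_py_spec : Claim_unchanged_group_mismatches_py := by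
  intro mm_positions mm_indices _ hD
  exact (A_eq_mid mm_positions mm_indices hD).trans (mid_eq_B mm_positions mm_indices hD)

theorem group_mismatches_py_changed : Claim_changed_group_mismatches_py := by
  unfold Claim_changed_group_mismatches_py; decide

theorem group_mismatches_py_tight : Claim_exact_group_mismatches_py := by
  intro mm_positions mm_indices _ hD
  have hz : mm_indices.zip mm_positions = [] := by
    rcases hD with h | h <;> simp [h]
  unfold group_mismatches_py group_mismatches_py_alt
  rw [hz]
  simp
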